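-- pv_equiv track=rewrite | github.com/GenTelLab/findClaw | app/scanner/mdns_scanner.py | _has_mdns_claw_signal
-- ===== SOURCE A (Python) =====
-- def _has_mdns_claw_signal(text: str) -> bool:
--     keyword_list = (
--         "openclaw",
--         "autoclaw",
--         "miniclaw",
--         "clawdbot",
--         "moltbot",
--         "gateway",
--         "claw",
--         "operator",
--         "gatewayport",
--         "x-claw-version",
--     )
--     return any(keyword in text for keyword in keyword_list)
-- ===== SOURCE B (Python) =====
-- # B: single left-to-right scan; at each position test whether one of the four
-- # minimal keywords starts there. The ten original keywords reduce to four,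
-- # since "openclaw", "autoclaw", "miniclaw", "clawdbot", "x-claw-version"
-- # all contain "claw" and "gatewayport" contains "gateway".
-- _MINIMAL = ("claw", "gateway", "moltbot", "operator")
--
-- def _has_mdns_claw_signal(text: str) -> bool:
--     for i in range(len(text)):
--         for kw in _MINIMAL:
--             if text.startswith(kw, i):
--                 return True
--     return False
-- ===== Notes on version B (the rewrite author's own statement) =====
-- stated objective: alternative
-- what changed: B replaces ten independent substring searches by a single left-to-right scan that tests, at each position, whether one of four minimal keywords starts there, after reducing the keyword set (every other keyword contains 'claw' or 'gateway').
import Mathlib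
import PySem

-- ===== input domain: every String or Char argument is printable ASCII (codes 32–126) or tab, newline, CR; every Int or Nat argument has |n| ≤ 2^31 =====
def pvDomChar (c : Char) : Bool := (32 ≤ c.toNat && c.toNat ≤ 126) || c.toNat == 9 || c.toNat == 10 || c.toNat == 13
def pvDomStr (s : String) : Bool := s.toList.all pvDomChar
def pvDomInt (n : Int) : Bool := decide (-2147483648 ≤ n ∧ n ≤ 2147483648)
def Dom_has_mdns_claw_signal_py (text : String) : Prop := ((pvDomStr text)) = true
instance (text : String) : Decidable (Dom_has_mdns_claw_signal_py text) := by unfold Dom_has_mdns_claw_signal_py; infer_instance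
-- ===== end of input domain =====

-- B replaces ten independent substring searches by one left-to-right scan testing a
-- reduced set of four keywords at each position (alternative decomposition, same result).


-- ===== PORT A =====
-- any(keyword in text for keyword in keyword_list) over the ten-keyword tuple
def has_mdns_claw_signal_py (text : String) : Bool :=
  ["openclaw", "autoclaw", "miniclaw", "clawdbot", "moltbot",
   "gateway", "claw", "operator", "gatewayport", "x-claw-version"].any
    (fun keyword => PySem.Str.isIn keyword text)

-- ===== PORT B =====
-- the reduced keyword set
def pvMinimalKw : List (List Char) :=
  ["claw".toList, "gateway".toList, "moltbot".toList, "operator".toList]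

-- for i in range(len(text)): if text.startswith(kw, i) for some kw: return True
def pvScan : List Char → Bool
  | [] => false
  | c :: rest =>
      (pvMinimalKw.any fun kw => PySem.Chars.startswith (c :: rest) kw) || pvScan rest

def has_mdns_claw_signal_py_alt (text : String) : Bool := pvScan text.toList

-- ===== PRECONDITION & SPEC =====
def Spec_has_mdns_claw_signal_py (text : String) (out : Bool) : Prop := out = has_mdns_claw_signal_py_alt text
instance (text : String) (out : Bool) : Decidable (Spec_has_mdns_claw_signal_py text out) := by unfold Spec_has_mdns_claw_signal_py; infer_instance

-- ===== CLAIM (what is proved, stated in full; the proofs are below) =====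
def Claim_equal_has_mdns_claw_signal_py : Prop := ∀ (text : String), Dom_has_mdns_claw_signal_py text → Spec_has_mdns_claw_signal_py text (has_mdns_claw_signal_py text)

-- ===== LEMMAS AND PROOFS =====

-- pvScan finds exactly the strings having some minimal keyword as an infix
theorem pvScan_iff (cs : List Char) :
    pvScan cs = true ↔ ∃ kw ∈ pvMinimalKw, kw <:+: cs := by
  induction cs with
  | nil => decide
  | cons c rest ih =>
      simp only [pvScan, Bool.or_eq_true, List.any_eq_true, ih,
        PySem.Chars.startswith_iff]
      constructor
      · rintro (⟨kw, hkw, hpre⟩ | ⟨kw, hkw, hinf⟩)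
        · exact ⟨kw, hkw, hpre.isInfix⟩
        · exact ⟨kw, hkw, hinf.trans (List.suffix_cons c rest).isInfix⟩
      · rintro ⟨kw, hkw, hinf⟩
        rcases List.infix_cons_iff.mp hinf with hpre | hinf'
        · exact Or.inl ⟨kw, hkw, hpre⟩
        · exact Or.inr ⟨kw, hkw, hinf'⟩

-- each of the ten original keywords contains one of the four minimal ones
theorem pvBig_imp_minimal (kw : String)
    (hkw : kw ∈ ["openclaw", "autoclaw", "miniclaw", "clawdbot", "moltbot",
      "gateway", "claw", "operator", "gatewayport", "x-claw-version"])
    (cs : List Char) (h : kw.toList <:+: cs) :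
    ∃ m ∈ pvMinimalKw, m <:+: cs := by
  fin_cases hkw
  · exact ⟨"claw".toList, by decide, (by decide : "claw".toList <:+: "openclaw".toList).trans h⟩
  · exact ⟨"claw".toList, by decide, (by decide : "claw".toList <:+: "autoclaw".toList).trans h⟩
  · exact ⟨"claw".toList, by decide, (by decide : "claw".toList <:+: "miniclaw".toList).trans h⟩
  · exact ⟨"claw".toList, by decide, (by decide : "claw".toList <:+: "clawdbot".toList).trans h⟩
  · exact ⟨"moltbot".toList, by decide, h⟩
  · exact ⟨"gateway".toList, by decide, h⟩
  · exact ⟨"claw".toList, by decide, h⟩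
  · exact ⟨"operator".toList, by decide, h⟩
  · exact ⟨"gateway".toList, by decide,
      (by decide : "gateway".toList <:+: "gatewayport".toList).trans h⟩
  · exact ⟨"claw".toList, by decide,
      (by decide : "claw".toList <:+: "x-claw-version".toList).trans h⟩

-- each minimal keyword is itself one of the ten
theorem pvMinimal_imp_big (m : List Char) (hm : m ∈ pvMinimalKw)
    (cs : List Char) (h : m <:+: cs) :
    ∃ kw ∈ (["openclaw", "autoclaw", "miniclaw", "clawdbot", "moltbot",
      "gateway", "claw", "operator", "gatewayport", "x-claw-version"] : List String),
      kw.toList <:+: cs := by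
  fin_cases hm
  · exact ⟨"claw", by decide, h⟩
  · exact ⟨"gateway", by decide, h⟩
  · exact ⟨"moltbot", by decide, h⟩
  · exact ⟨"operator", by decide, h⟩

-- ===== VERDICT (by name: the statement is the Claim_ definition above) =====
theorem has_mdns_claw_signal_py_spec : Claim_equal_has_mdns_claw_signal_py := by
  intro text _
  unfold Spec_has_mdns_claw_signal_py has_mdns_claw_signal_py has_mdns_claw_signal_py_alt
  rw [Bool.eq_iff_iff, pvScan_iff, List.any_eq_true]
  simp only [PySem.Str.isIn_iff_infix]
  constructor
  · rintro ⟨kw, hkw, hinf⟩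
    exact pvBig_imp_minimal kw hkw text.toList hinf
  · rintro ⟨m, hm, hinf⟩
    exact pvMinimal_imp_big m hm text.toList hinf
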